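-- pv_equiv track=rewrite | github.com/pypi-data/pypi-mirror-202 | packages/validate-pypi-name/validate_pypi_name-1.0.4-py3-none-any.whl/validate_pypi_name/validator.py | get_some_variations
-- ===== SOURCE A (Python) =====
-- def get_some_variations(original_list):
--     variations = []
--     for singleWord in original_list:
--         variations.extend(variate(singleWord, '_'))
--     lst = [i for i in variations]
--     for singleWord in lst:
--         variations.extend(variate(singleWord, '.'))
--
--     lst = [i for i in variations]
--     for singleWord in lst:
--         variations.extend(variate(singleWord, '-'))
--
--     return variations
--
-- def variate(original_string, char):
--     lst = []
--     items = [char for char in original_string]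
--     bits  = len(items) - 1
--
--     for n in range(1, int(2**bits)):
--         lst.append(''.join(items[i] + (char if n & (1<<i) else '') for i in range(bits)) + items[-1])
--
--
--     realLst = []
--     for word in lst:
--         if (word.count(char) < 2):
--             realLst.append(word)
--     return realLst
-- ===== SOURCE B (Python) =====
-- def variate(original_string, char):
--     # A word already containing char would exceed the <2-separator limit after
--     # any insertion, so it yields nothing; otherwise each gap gets one char.
--     if char in original_string:
--         return []
--     return [original_string[:i + 1] + char + original_string[i + 1:]
--             for i in range(len(original_string) - 1)]
--
-- def get_some_variations(original_list):
--     variations = [w for s in original_list for w in variate(s, '_')]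
--     variations += [w for s in variations for w in variate(s, '.')]
--     variations += [w for s in variations for w in variate(s, '-')]
--     return variations
-- ===== Notes on version B (the rewrite author's own statement) =====
-- stated objective: faster
-- what changed: variate no longer enumerates all 2^(len-1) separator bitmasks and filters by count; B directly emits the len-1 single-gap insertions (or nothing when the word already contains the separator), which is exactly what survives A's count<2 filter.
import Mathlib
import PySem

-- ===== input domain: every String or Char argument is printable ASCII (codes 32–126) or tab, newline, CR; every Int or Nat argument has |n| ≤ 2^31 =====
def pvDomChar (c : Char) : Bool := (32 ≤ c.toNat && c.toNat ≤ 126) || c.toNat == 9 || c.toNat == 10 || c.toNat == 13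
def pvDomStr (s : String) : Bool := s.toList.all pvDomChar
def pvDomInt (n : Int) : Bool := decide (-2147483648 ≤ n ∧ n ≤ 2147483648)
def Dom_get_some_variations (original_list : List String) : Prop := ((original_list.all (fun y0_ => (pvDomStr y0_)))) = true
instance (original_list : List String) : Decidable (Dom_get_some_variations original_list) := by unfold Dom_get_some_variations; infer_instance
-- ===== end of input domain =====

-- B replaces A's exponential bitmask enumeration + count filter in `variate` by directly
-- emitting the one-separator insertions (or nothing when the word already contains the
-- separator); measured faster (asymptotic: O(2^n·n) → O(n^2) per word).

-- ===== PORT A =====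
-- variate(original_string, char): enumerate n in range(1, int(2**bits)), build the word with
-- char inserted at the set-bit gaps, keep words with word.count(char) < 2.
def pvVariateA (original_string : String) (ch : Char) : List String :=
  let items : List Char := original_string.toList
  let bits : Int := (items.length : Int) - 1
  -- int(2**bits): for bits = -1 (empty string) Python's 2**-1 = 0.5 and int(0.5) = 0
  let hi : Int := if bits < 0 then 0 else ((2 : Int) ^ bits.toNat)
  let lst : List String :=
    (PySem.List.pyRange 1 hi 1).map (fun n =>
      -- n ≥ 1 here, so the truthiness of `n & (1 << i)` is exactly `n.toNat.testBit i`
      String.ofList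
        ((((List.range bits.toNat).map (fun (i : Nat) =>
            [PySem.List.pyGetD items (i : Int) ' '] ++
              (if n.toNat.testBit i then [ch] else []))).flatten)
          ++ [PySem.List.pyGetD items (-1) ' ']))
  lst.filter (fun word => PySem.Str.count word (String.ofList [ch]) < 2)

def get_some_variations (original_list : List String) : List String :=
  let variations : List String :=
    original_list.foldl (fun acc w => acc ++ pvVariateA w '_') []
  let lst := variations.map (fun i => i)
  let variations := lst.foldl (fun acc w => acc ++ pvVariateA w '.') variations
  let lst := variations.map (fun i => i)
  let variations := lst.foldl (fun acc w => acc ++ pvVariateA w '-') variations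
  variations

-- ===== PORT B =====
-- variate(original_string, char): nothing if char already occurs, else one insertion per gap.
def pvVariateB (original_string : String) (ch : Char) : List String :=
  let cs : List Char := original_string.toList
  if PySem.Str.isIn (String.ofList [ch]) original_string then []
  else
    (List.range (cs.length - 1)).map (fun (i : Nat) =>
      String.ofList
        (PySem.List.slice cs none (some ((i : Int) + 1)) ++ [ch] ++
         PySem.List.slice cs (some ((i : Int) + 1)) none))

def get_some_variations_alt (original_list : List String) : List String :=
  let v1 := original_list.flatMap (fun s => pvVariateB s '_')
  let v2 := v1 ++ v1.flatMap (fun s => pvVariateB s '.')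
  let v3 := v2 ++ v2.flatMap (fun s => pvVariateB s '-')
  v3

-- ===== PRECONDITION & SPEC =====
def Spec_get_some_variations (original_list : List String) (out : List String) : Prop := out = get_some_variations_alt original_list
instance (original_list : List String) (out : List String) : Decidable (Spec_get_some_variations original_list out) := by unfold Spec_get_some_variations; infer_instance

-- ===== CLAIM (what is proved, stated in full; the proofs are below) =====
def Claim_equal_get_some_variations : Prop := ∀ (original_list : List String), Dom_get_some_variations original_list → Spec_get_some_variations original_list (get_some_variations original_list)

-- ===== LEMMAS AND PROOFS =====

-- the word A builds for mask n, in structural-recursion form (low bit first)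
def pvWord (c : Char) : Nat → List Char → List Char
  | _, [] => []
  | _, [x] => [x]
  | n, x :: y :: l => x :: ((if n % 2 = 1 then [c] else []) ++ pvWord c (n / 2) (y :: l))

-- number of set bits among the low b bits of n
def pvBits : Nat → Nat → Nat
  | _, 0 => 0
  | n, b + 1 => n % 2 + pvBits (n / 2) b

theorem pvWord_zero (c : Char) (l : List Char) : pvWord c 0 l = l := by
  induction l with
  | nil => rfl
  | cons x l ih =>
    cases l with
    | nil => rfl
    | cons y m => simp [pvWord]; simpa [pvWord] using ih

theorem pvBits_zero (b : Nat) : pvBits 0 b = 0 := by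
  induction b with
  | zero => rfl
  | succ b ih => simp [pvBits, ih]

theorem pvBits_pos {n b : Nat} (hn : 0 < n) (hb : n < 2 ^ b) : 0 < pvBits n b := by
  induction b generalizing n with
  | zero => omega
  | succ b ih =>
    by_cases h : n % 2 = 1
    · simp [pvBits, h]
    · have h2 : 0 < n / 2 := by omega
      have h3 : n / 2 < 2 ^ b := by
        have : 2 ^ (b + 1) = 2 * 2 ^ b := by ring
        omega
      have := ih h2 h3
      simp [pvBits]
      omega

theorem pvBits_irrel {n b : Nat} (hb : n < 2 ^ b) : pvBits n (b + 1) = pvBits n b := by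
  induction b generalizing n with
  | zero =>
    have : n = 0 := by omega
    subst this; simp [pvBits_zero]
  | succ b ih =>
    have h3 : n / 2 < 2 ^ b := by
      have : 2 ^ (b + 1) = 2 * 2 ^ b := by ring
      omega
    rw [show pvBits n (b + 1 + 1) = n % 2 + pvBits (n / 2) (b + 1) from rfl, ih h3,
        show pvBits n (b + 1) = n % 2 + pvBits (n / 2) b from rfl]

theorem pvBits_add_pow {m b : Nat} (hm : m < 2 ^ b) :
    pvBits (2 ^ b + m) (b + 1) = pvBits m b + 1 := by
  induction b generalizing m with
  | zero =>
    have : m = 0 := by omega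
    subst this; simp [pvBits]
  | succ b ih =>
    have hmod : (2 ^ (b + 1) + m) % 2 = m % 2 := by
      have : 2 ^ (b + 1) = 2 * 2 ^ b := by ring
      omega
    have hdiv : (2 ^ (b + 1) + m) / 2 = 2 ^ b + m / 2 := by
      have : 2 ^ (b + 1) = 2 * 2 ^ b := by ring
      omega
    have hm2 : m / 2 < 2 ^ b := by
      have : 2 ^ (b + 1) = 2 * 2 ^ b := by ring
      omega
    rw [show pvBits (2 ^ (b + 1) + m) (b + 1 + 1)
          = (2 ^ (b + 1) + m) % 2 + pvBits ((2 ^ (b + 1) + m) / 2) (b + 1) from rfl,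
        hmod, hdiv, ih hm2,
        show pvBits m (b + 1) = m % 2 + pvBits (m / 2) b from rfl]
    omega

-- count of the separator in the built word
theorem pvWord_count (c : Char) (n : Nat) (l : List Char) :
    (pvWord c n l).count c = l.count c + pvBits n (l.length - 1) := by
  induction l generalizing n with
  | nil => simp [pvWord, pvBits]
  | cons x l ih =>
    cases l with
    | nil => simp [pvWord, pvBits]
    | cons y m =>
      by_cases h : n % 2 = 1 <;>
        simp [pvWord, h, List.count_cons, ih (n / 2), pvBits] <;> omega

-- the word built at mask 2^i is the single insertion at gap i
theorem pvWord_pow (c : Char) (l : List Char) (i : Nat) (h : i + 1 < l.length) :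
    pvWord c (2 ^ i) l = l.take (i + 1) ++ c :: l.drop (i + 1) := by
  induction l generalizing i with
  | nil => simp at h
  | cons x l ih =>
    cases l with
    | nil => simp at h
    | cons y m =>
      cases i with
      | zero => simp [pvWord, pvWord_zero]
      | succ k =>
        have h2 : (2 : Nat) ^ (k + 1) % 2 = 0 := by
          have : 2 ^ (k + 1) = 2 * 2 ^ k := by ring
          omega
        have h3 : (2 : Nat) ^ (k + 1) / 2 = 2 ^ k := by
          have : 2 ^ (k + 1) = 2 * 2 ^ k := by ring
          omega
        have h4 : k + 1 < (y :: m).length := by simp at h ⊢; omega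
        simp [pvWord, h2, h3, ih k h4]

-- the mask list A filters, and what survives the count filter
theorem pvMask_filter (b : Nat) :
    (((List.range (2 ^ b - 1)).map (fun k => k + 1)).filter
        (fun n => decide (pvBits n b < 2))) = (List.range b).map (2 ^ ·) := by
  induction b with
  | zero => simp
  | succ b ih =>
    have hN : 0 < 2 ^ b := Nat.two_pow_pos b
    have hsplit : 2 ^ (b + 1) - 1 = (2 ^ b - 1) + 2 ^ b := by
      have : 2 ^ (b + 1) = 2 * 2 ^ b := by ring
      omega
    rw [hsplit, List.range_add, List.map_append, List.filter_append]
    have h1 : ((List.range (2 ^ b - 1)).map (fun k => k + 1)).filter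
        (fun n => decide (pvBits n (b + 1) < 2)) = (List.range b).map (2 ^ ·) := by
      rw [List.filter_congr, ih]
      intro n hn
      simp only [List.mem_map, List.mem_range] at hn
      obtain ⟨k, hk, rfl⟩ := hn
      rw [pvBits_irrel (by omega)]
    have h2 : (((List.range (2 ^ b)).map (fun x => 2 ^ b - 1 + x)).map (fun k => k + 1)).filter
        (fun n => decide (pvBits n (b + 1) < 2)) = [2 ^ b] := by
      rw [List.map_map]
      have hmap : ((fun k => k + 1) ∘ fun x => 2 ^ b - 1 + x) = (fun m => 2 ^ b + m) := by
        funext m; simp; omega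
      rw [hmap, List.filter_map]
      have hempty : ((List.range (2 ^ b - 1)).map Nat.succ).filter
          ((fun n => decide (pvBits n (b + 1) < 2)) ∘ (fun m => 2 ^ b + m)) = [] := by
        rw [List.filter_eq_nil_iff]
        intro a ha
        simp only [List.mem_map, List.mem_range] at ha
        obtain ⟨k, hk, rfl⟩ := ha
        simp only [Function.comp_apply, decide_eq_true_eq, not_lt]
        rw [pvBits_add_pow (by omega)]
        have := pvBits_pos (n := k.succ) (b := b) (by omega) (by omega)
        omega
      have hrange : List.range (2 ^ b) = 0 :: (List.range (2 ^ b - 1)).map Nat.succ := by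
        rw [← List.range_succ_eq_map]; congr 1; omega
      have h0 : pvBits (2 ^ b) (b + 1) = 1 := by
        have h := pvBits_add_pow (m := 0) (b := b) (Nat.two_pow_pos b)
        simpa [pvBits_zero] using h
      have hz : ((fun n => decide (pvBits n (b + 1) < 2)) ∘ (fun m => 2 ^ b + m)) 0 = true := by
        simp [h0]
      rw [hrange, List.filter_cons, if_pos hz, hempty]
      simp
    rw [h1, h2, List.range_succ]
    simp

-- PySem.Chars.count with a single-character needle is List.count
theorem pvCount_go_singleton (c : Char) (l : List Char) (fuel acc : Nat) (h : l.length ≤ fuel) :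
    PySem.Chars.count.go [c] fuel l acc = acc + l.count c := by
  induction l generalizing fuel acc with
  | nil => cases fuel <;> · rw [PySem.Chars.count.go.eq_def]; simp
  | cons x t ih =>
    cases fuel with
    | zero => simp at h
    | succ fuel =>
      have hstep : PySem.Chars.count.go [c] (fuel + 1) (x :: t) acc
          = if [c].isPrefixOf (x :: t) then PySem.Chars.count.go [c] fuel (List.drop 1 (x :: t)) (acc + 1)
            else PySem.Chars.count.go [c] fuel t acc := by
        rw [PySem.Chars.count.go.eq_def]; rfl
      rw [hstep]
      have ht : t.length ≤ fuel := by simp at h; omega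
      by_cases hx : x = c
      · subst hx
        simp only [List.isPrefixOf, BEq.rfl, Bool.true_and, if_true,
          List.drop_one, List.tail_cons]
        rw [ih fuel (acc + 1) ht]
        simp [List.count_cons]
        omega
      · have hpre : [c].isPrefixOf (x :: t) = false := by
          simp [List.isPrefixOf]
          exact fun hcx => hx hcx.symm
        rw [hpre]
        simp only [Bool.false_eq_true, if_false]
        rw [ih fuel acc ht]
        rw [List.count_cons]
        have : ¬ (x == c) = true := by simp; exact hx
        simp [this]
      
theorem pvCount_singleton (c : Char) (l : List Char) :
    PySem.Chars.count l [c] = l.count c := by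
  rw [PySem.Chars.count]
  simp only [List.isEmpty_cons, if_false, Bool.false_eq_true]
  simpa using pvCount_go_singleton c l l.length 0 le_rfl

theorem pvIsIn_singleton (c : Char) (l : List Char) :
    PySem.Chars.isIn [c] l = l.contains c := by
  by_cases h : c ∈ l
  · obtain ⟨u, v, rfl⟩ := List.append_of_mem h
    have hinf : [c] <:+: u ++ c :: v := ⟨u, v, by simp⟩
    rw [(PySem.Chars.isIn_iff_infix _ _).mpr hinf]
    simp [List.contains_eq_mem, h]
  · have hninf : ¬ [c] <:+: l := fun hin => h (hin.subset (by simp))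
    have hF : PySem.Chars.isIn [c] l = false := by
      rw [← Bool.not_eq_true, PySem.Chars.isIn_iff_infix]; exact hninf
    rw [hF]
    simp [List.contains_eq_mem, h]

-- the word A builds for mask n, expressed through pvWord
theorem pvBuild_eq (c : Char) (L : List Char) : ∀ (x : Char) (n : Nat),
    (((List.range L.length).map (fun (i : Nat) =>
        [PySem.List.pyGetD (x :: L) (i : Int) ' '] ++ (if n.testBit i then [c] else []))).flatten
      ++ [PySem.List.pyGetD (x :: L) (-1) ' ']) = pvWord c n (x :: L) := by
  induction L with
  | nil =>
    intro x n
    simp [pvWord, PySem.List.pyGetD_neg_one [x] ' ' (by simp)]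
  | cons y M ih =>
    intro x n
    rw [List.length_cons, List.range_succ_eq_map, List.map_cons, List.map_map, List.flatten_cons]
    have hf : ((fun (i : Nat) =>
          [PySem.List.pyGetD (x :: y :: M) (i : Int) ' '] ++ (if n.testBit i then [c] else [])) ∘ Nat.succ)
        = (fun (i : Nat) =>
          [PySem.List.pyGetD (y :: M) (i : Int) ' '] ++ (if (n / 2).testBit i then [c] else [])) := by
      funext i
      simp only [Function.comp_apply, Nat.succ_eq_add_one, Nat.testBit_succ,
        PySem.List.pyGetD_natCast, List.getD_cons_succ]
    have hlast : PySem.List.pyGetD (x :: y :: M) (-1) ' ' = PySem.List.pyGetD (y :: M) (-1) ' ' := by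
      rw [PySem.List.pyGetD_neg_one _ _ (by simp), PySem.List.pyGetD_neg_one _ _ (by simp)]
      exact List.getLast_cons _
    rw [hf, hlast]
    simp only [List.append_assoc]
    rw [ih y (n / 2)]
    simp [pvWord, Nat.testBit_zero, PySem.List.pyGetD_zero_cons]

-- A's variate equals B's variate
theorem pvVariate_eq (s : String) (c : Char) : pvVariateA s c = pvVariateB s c := by
  rcases hcs : s.toList with _ | ⟨x, L⟩
  · unfold pvVariateA pvVariateB
    simp only [hcs, PySem.Str.isIn_eq, String.toList_ofList, pvIsIn_singleton]
    rw [PySem.List.pyRange_one_eq_nil (by norm_num)]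
    simp
  · unfold pvVariateA pvVariateB
    simp only [hcs, PySem.Str.isIn_eq, String.toList_ofList, pvIsIn_singleton,
      PySem.Str.count_eq, pvCount_singleton, List.length_cons]
    have hb1 : ((↑(L.length + 1) : Int) - 1) = (L.length : Int) := by push_cast; ring
    rw [hb1, if_neg (by exact not_lt.mpr (Int.natCast_nonneg _)), Int.toNat_natCast,
      PySem.List.pyRange_one]
    have hN : (((2 : Int) ^ L.length) - 1).toNat = 2 ^ L.length - 1 := by
      have h2 : ((2 : Int) ^ L.length) = ((2 ^ L.length : Nat) : Int) := by push_cast; ring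
      rw [h2]; omega
    rw [hN, List.map_map]
    simp only [Function.comp_def]
    simp only [show ∀ k : Nat, ((1 : Int) + (k : Int)).toNat = k + 1 from fun k => by omega]
    simp only [pvBuild_eq]
    rw [List.filter_map]
    simp only [Function.comp_def, String.toList_ofList, pvWord_count, List.length_cons,
      Nat.add_sub_cancel]
    by_cases hc : c ∈ (x :: L)
    · rw [if_pos (by simpa using hc)]
      rw [List.filter_eq_nil_iff.mpr, List.map_nil]
      intro k hk
      simp only [List.mem_range] at hk
      have h1 : 0 < (x :: L).count c := List.count_pos_iff.mpr hc
      have h2 : 0 < pvBits (k + 1) L.length :=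
        pvBits_pos (by omega) (by have := Nat.two_pow_pos L.length; omega)
      simp only [decide_eq_true_eq, not_lt]
      omega
    · rw [if_neg (by simpa using hc)]
      have hcc : (x :: L).count c = 0 := List.count_eq_zero.mpr hc
      simp only [hcc, Nat.zero_add]
      have key : List.map (fun k => String.ofList (pvWord c (k + 1) (x :: L)))
            ((List.range (2 ^ L.length - 1)).filter (fun k => decide (pvBits (k + 1) L.length < 2)))
          = List.map (fun n => String.ofList (pvWord c n (x :: L)))
            (((List.range (2 ^ L.length - 1)).map (fun k => k + 1)).filter
                (fun n => decide (pvBits n L.length < 2))) := by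
        rw [List.filter_map, List.map_map]
        simp [Function.comp_def]
      rw [key, pvMask_filter, List.map_map]
      refine List.map_congr_left ?_
      intro i hi
      simp only [List.mem_range] at hi
      simp only [Function.comp_apply]
      rw [pvWord_pow c (x :: L) i (by simp; omega)]
      rw [show ((i : Int) + 1) = ((i + 1 : Nat) : Int) by push_cast; ring,
        PySem.List.slice_to_natCast, PySem.List.slice_from_natCast]
      simp

theorem pv_get_eq (l : List String) : get_some_variations l = get_some_variations_alt l := by
  simp only [get_some_variations, get_some_variations_alt, List.map_id_fun',
    PySem.List.foldl_append_eq_flatMap, List.nil_append, pvVariate_eq, id]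

-- ===== VERDICT (by name: the statement is the Claim_ definition above) =====
theorem get_some_variations_spec : Claim_equal_get_some_variations := by
  intro l _
  unfold Spec_get_some_variations
  exact pv_get_eq l
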